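-- pv_equiv track=rewrite | github.com/leungt30/slackfish | featureEng.py | pst_score
-- ===== SOURCE A (Python) =====
-- def pst_score(fenstr: str) -> int:
--     values = {'P': 100, 'N': 320, 'B': 330, 'R': 500, 'Q': 900, 'K': 20000}
--     pst = {
--         'P': (   0,   0,   0,   0,   0,   0,   0,   0,
--                 78,  83,  86,  73, 102,  82,  85,  90,
--                  7,  29,  21,  44,  40,  31,  44,   7,
--                -17,  16,  -2,  15,  14,   0,  15, -13,
--                -26,   3,  10,   9,   6,   1,   0, -23,
--                -22,   9,   5, -11, -10,  -2,   3, -19,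
--                -31,   8,  -7, -37, -36, -14,   3, -31,
--                  0,   0,   0,   0,   0,   0,   0,   0),
--         'N': ( -66, -53, -75, -75, -10, -55, -58, -70,
--                 -3,  -6, 100, -36,   4,  62,  -4, -14,
--                 10,  67,   1,  74,  73,  27,  62,  -2,
--                 24,  24,  45,  37,  33,  41,  25,  17,
--                 -1,   5,  31,  21,  22,  35,   2,   0,
--                -18,  10,  13,  22,  18,  15,  11, -14,
--                -23, -15,   2,   0,   2,   0, -23, -20,
--                -74, -23, -26, -24, -19, -35, -22, -69),
--         'B': ( -59, -78, -82, -76, -23,-107, -37, -50,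
--                -11,  20,  35, -42, -39,  31,   2, -22,
--                 -9,  39, -32,  41,  52, -10,  28, -14,
--                 25,  17,  20,  34,  26,  25,  15,  10,
--                 13,  10,  17,  23,  17,  16,   0,   7,
--                 14,  25,  24,  15,   8,  25,  20,  15,
--                 19,  20,  11,   6,   7,   6,  20,  16,
--                 -7,   2, -15, -12, -14, -15, -10, -10),
--         'R': (  35,  29,  33,   4,  37,  33,  56,  50,
--                 55,  29,  56,  67,  55,  62,  34,  60,
--                 19,  35,  28,  33,  45,  27,  25,  15,
--                  0,   5,  16,  13,  18,  -4,  -9,  -6,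
--                -28, -35, -16, -21, -13, -29, -46, -30,
--                -42, -28, -42, -25, -25, -35, -26, -46,
--                -53, -38, -31, -26, -29, -43, -44, -53,
--                -30, -24, -18,   5,  -2, -18, -31, -32),
--         'Q': (   6,   1,  -8,-104,  69,  24,  88,  26,
--                 14,  32,  60, -10,  20,  76,  57,  24,
--                 -2,  43,  32,  60,  72,  63,  43,   2,
--                  1, -16,  22,  17,  25,  20, -13,  -6,
--                -14, -15,  -2,  -5,  -1, -10, -20, -22,
--                -30,  -6, -13, -11, -16, -11, -16, -27,
--                -36, -18,   0, -19, -15, -15, -21, -38,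
--                -39, -30, -31, -13, -31, -36, -34, -42),
--         'K': (   4,  54,  47, -99, -99,  60,  83, -62,
--                -32,  10,  55,  56,  56,  55,  10,   3,
--                -62,  12, -57,  44, -67,  28,  37, -31,
--                -55,  50,  11,  -4, -19,  13,   0, -49,
--                -55, -43, -52, -28, -51, -47,  -8, -50,
--                -47, -42, -43, -79, -64, -32, -29, -32,
--                 -4,   3, -14, -50, -57, -18,  13,   4,
--                 17,  30,  -3, -14,   6,  -1,  40,  18),
--     }
--     score = 0
--     position = 0
--     for char in fenstr.split(" ")[0]:
--         if char.upper() in pst.keys():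
--             # uses position to get value from pst table if white
--             # reverse order if black
--             # adds piece value and position value from table combined if white
--             # subtracts piece value if black
--             score += (pst[char.upper()][position if char.isupper() else -position] + values.get(char.upper())) * (1 if char.isupper() else -1)
--             position += 1
--         if char.isdigit():
--             position += int(char)
--
--     return score
-- ===== SOURCE B (Python) =====
-- def pst_score(fenstr: str) -> int:
--     # piece-square tables with material value baked in (comb[p][i] = pst[p][i] + value[p])
--     comb = {
--         'P': (100, 100, 100, 100, 100, 100, 100, 100, 178, 183, 186, 173, 202, 182, 185, 190, 107, 129, 121, 144, 140, 131, 144, 107, 83, 116, 98, 115, 114, 100, 115, 87, 74, 103, 110, 109, 106, 101, 100, 77, 78, 109, 105, 89, 90, 98, 103, 81, 69, 108, 93, 63, 64, 86, 103, 69, 100, 100, 100, 100, 100, 100, 100, 100),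
--         'N': (254, 267, 245, 245, 310, 265, 262, 250, 317, 314, 420, 284, 324, 382, 316, 306, 330, 387, 321, 394, 393, 347, 382, 318, 344, 344, 365, 357, 353, 361, 345, 337, 319, 325, 351, 341, 342, 355, 322, 320, 302, 330, 333, 342, 338, 335, 331, 306, 297, 305, 322, 320, 322, 320, 297, 300, 246, 297, 294, 296, 301, 285, 298, 251),
--         'B': (271, 252, 248, 254, 307, 223, 293, 280, 319, 350, 365, 288, 291, 361, 332, 308, 321, 369, 298, 371, 382, 320, 358, 316, 355, 347, 350, 364, 356, 355, 345, 340, 343, 340, 347, 353, 347, 346, 330, 337, 344, 355, 354, 345, 338, 355, 350, 345, 349, 350, 341, 336, 337, 336, 350, 346, 323, 332, 315, 318, 316, 315, 320, 320),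
--         'R': (535, 529, 533, 504, 537, 533, 556, 550, 555, 529, 556, 567, 555, 562, 534, 560, 519, 535, 528, 533, 545, 527, 525, 515, 500, 505, 516, 513, 518, 496, 491, 494, 472, 465, 484, 479, 487, 471, 454, 470, 458, 472, 458, 475, 475, 465, 474, 454, 447, 462, 469, 474, 471, 457, 456, 447, 470, 476, 482, 505, 498, 482, 469, 468),
--         'Q': (906, 901, 892, 796, 969, 924, 988, 926, 914, 932, 960, 890, 920, 976, 957, 924, 898, 943, 932, 960, 972, 963, 943, 902, 901, 884, 922, 917, 925, 920, 887, 894, 886, 885, 898, 895, 899, 890, 880, 878, 870, 894, 887, 889, 884, 889, 884, 873, 864, 882, 900, 881, 885, 885, 879, 862, 861, 870, 869, 887, 869, 864, 866, 858),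
--         'K': (20004, 20054, 20047, 19901, 19901, 20060, 20083, 19938, 19968, 20010, 20055, 20056, 20056, 20055, 20010, 20003, 19938, 20012, 19943, 20044, 19933, 20028, 20037, 19969, 19945, 20050, 20011, 19996, 19981, 20013, 20000, 19951, 19945, 19957, 19948, 19972, 19949, 19953, 19992, 19950, 19953, 19958, 19957, 19921, 19936, 19968, 19971, 19968, 19996, 20003, 19986, 19950, 19943, 19982, 20013, 20004, 20017, 20030, 19997, 19986, 20006, 19999, 20040, 20018),
--     }
--     # pass 1: expand the FEN board field into a flat square list
--     board = []
--     for ch in fenstr.split(" ")[0]: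
--         if ch.upper() in comb:
--             board.append(ch)
--         elif ch.isdigit():
--             board.extend('.' * int(ch))
--     # pass 2: tally white and black totals separately, no sign arithmetic
--     white = 0
--     black = 0
--     for i, pc in enumerate(board):
--         if pc.isupper():
--             white += comb[pc][i]
--         elif pc.islower():
--             black += comb[pc.upper()][-i]
--     return white - black
-- ===== Notes on version B (the rewrite author's own statement) =====
-- stated objective: alternative
-- what changed: B precomputes combined tables with the material value baked into every square (comb[p][i] = pst[p][i] + value[p]), expands the FEN board field into a flat square list in a first pass, then tallies white and black totals in two separate accumulators over enumerate(board) and returns white - black, instead of A's single pass that threads a running position counter and multiplies (pst + value) by a sign.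
import Mathlib
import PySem

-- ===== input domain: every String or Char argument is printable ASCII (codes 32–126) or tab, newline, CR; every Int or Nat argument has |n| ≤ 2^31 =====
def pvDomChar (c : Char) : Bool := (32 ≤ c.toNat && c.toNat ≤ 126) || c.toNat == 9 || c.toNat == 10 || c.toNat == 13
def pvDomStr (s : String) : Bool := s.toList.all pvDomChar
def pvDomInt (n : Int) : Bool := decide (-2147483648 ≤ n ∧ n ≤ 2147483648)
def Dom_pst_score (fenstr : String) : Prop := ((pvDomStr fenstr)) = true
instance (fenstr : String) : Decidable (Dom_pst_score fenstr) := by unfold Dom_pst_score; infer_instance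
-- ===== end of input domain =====

-- B bakes the material value into the piece-square tables, expands the FEN board field into a
-- flat square list, then tallies white and black totals separately and returns white - black
-- (alternative decomposition, same cost; Pre_ excludes the inputs where Python A raises IndexError).

def pvVal (c : Char) : Int :=
  match c with
  | 'P' => 100
  | 'N' => 320
  | 'B' => 330
  | 'R' => 500
  | 'Q' => 900
  | 'K' => 20000
  | _ => 0

def pvPst (c : Char) : List Int :=
  match c with
  | 'P' => [0, 0, 0, 0, 0, 0, 0, 0, 78, 83, 86, 73, 102, 82, 85, 90, 7, 29, 21, 44, 40, 31, 44, 7, -17, 16, -2, 15, 14, 0, 15, -13, -26, 3, 10, 9, 6, 1, 0, -23, -22, 9, 5, -11, -10, -2, 3, -19, -31, 8, -7, -37, -36, -14, 3, -31, 0, 0, 0, 0, 0, 0, 0, 0]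
  | 'N' => [-66, -53, -75, -75, -10, -55, -58, -70, -3, -6, 100, -36, 4, 62, -4, -14, 10, 67, 1, 74, 73, 27, 62, -2, 24, 24, 45, 37, 33, 41, 25, 17, -1, 5, 31, 21, 22, 35, 2, 0, -18, 10, 13, 22, 18, 15, 11, -14, -23, -15, 2, 0, 2, 0, -23, -20, -74, -23, -26, -24, -19, -35, -22, -69]
  | 'B' => [-59, -78, -82, -76, -23, -107, -37, -50, -11, 20, 35, -42, -39, 31, 2, -22, -9, 39, -32, 41, 52, -10, 28, -14, 25, 17, 20, 34, 26, 25, 15, 10, 13, 10, 17, 23, 17, 16, 0, 7, 14, 25, 24, 15, 8, 25, 20, 15, 19, 20, 11, 6, 7, 6, 20, 16, -7, 2, -15, -12, -14, -15, -10, -10]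
  | 'R' => [35, 29, 33, 4, 37, 33, 56, 50, 55, 29, 56, 67, 55, 62, 34, 60, 19, 35, 28, 33, 45, 27, 25, 15, 0, 5, 16, 13, 18, -4, -9, -6, -28, -35, -16, -21, -13, -29, -46, -30, -42, -28, -42, -25, -25, -35, -26, -46, -53, -38, -31, -26, -29, -43, -44, -53, -30, -24, -18, 5, -2, -18, -31, -32]
  | 'Q' => [6, 1, -8, -104, 69, 24, 88, 26, 14, 32, 60, -10, 20, 76, 57, 24, -2, 43, 32, 60, 72, 63, 43, 2, 1, -16, 22, 17, 25, 20, -13, -6, -14, -15, -2, -5, -1, -10, -20, -22, -30, -6, -13, -11, -16, -11, -16, -27, -36, -18, 0, -19, -15, -15, -21, -38, -39, -30, -31, -13, -31, -36, -34, -42]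
  | 'K' => [4, 54, 47, -99, -99, 60, 83, -62, -32, 10, 55, 56, 56, 55, 10, 3, -62, 12, -57, 44, -67, 28, 37, -31, -55, 50, 11, -4, -19, 13, 0, -49, -55, -43, -52, -28, -51, -47, -8, -50, -47, -42, -43, -79, -64, -32, -29, -32, -4, 3, -14, -50, -57, -18, 13, 4, 17, 30, -3, -14, 6, -1, 40, 18]
  | _ => []

def pvKeys : List Char := ['P', 'N', 'B', 'R', 'Q', 'K']

-- the board field fenstr.split(" ")[0], as a char list (both sources share this very line)
def pvField (fenstr : String) : List Char :=
  ((((PySem.Str.split? fenstr " ").getD []).headD "").toList)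

-- ===== PORT A =====
-- literal port of A: one pass over the field chars, threading (score, position)
def pst_score (fenstr : String) : Int :=
  (List.foldl (fun (sp : Int × Int) ch =>
      let sp :=
        if PySem.Chars.upperChar ch ∈ pvKeys then
          (sp.1 + ((PySem.List.pyGet? (pvPst (PySem.Chars.upperChar ch))
                      (if PySem.Chars.isupper ch then sp.2 else -sp.2)).getD 0
                    + pvVal (PySem.Chars.upperChar ch))
                  * (if PySem.Chars.isupper ch then 1 else -1),
           sp.2 + 1)
        else sp
      if PySem.Chars.isdigit ch then (sp.1, sp.2 + (PySem.Int.ofChars? [ch]).getD 0) else sp)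
    (0, 0) (pvField fenstr)).1

-- ===== PORT B =====
-- B's combined tables: pvComb c = pst[c] with the material value of c added to every entry
def pvComb (c : Char) : List Int :=
  match c with
  | 'P' => [100, 100, 100, 100, 100, 100, 100, 100, 178, 183, 186, 173, 202, 182, 185, 190, 107, 129, 121, 144, 140, 131, 144, 107, 83, 116, 98, 115, 114, 100, 115, 87, 74, 103, 110, 109, 106, 101, 100, 77, 78, 109, 105, 89, 90, 98, 103, 81, 69, 108, 93, 63, 64, 86, 103, 69, 100, 100, 100, 100, 100, 100, 100, 100]
  | 'N' => [254, 267, 245, 245, 310, 265, 262, 250, 317, 314, 420, 284, 324, 382, 316, 306, 330, 387, 321, 394, 393, 347, 382, 318, 344, 344, 365, 357, 353, 361, 345, 337, 319, 325, 351, 341, 342, 355, 322, 320, 302, 330, 333, 342, 338, 335, 331, 306, 297, 305, 322, 320, 322, 320, 297, 300, 246, 297, 294, 296, 301, 285, 298, 251]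
  | 'B' => [271, 252, 248, 254, 307, 223, 293, 280, 319, 350, 365, 288, 291, 361, 332, 308, 321, 369, 298, 371, 382, 320, 358, 316, 355, 347, 350, 364, 356, 355, 345, 340, 343, 340, 347, 353, 347, 346, 330, 337, 344, 355, 354, 345, 338, 355, 350, 345, 349, 350, 341, 336, 337, 336, 350, 346, 323, 332, 315, 318, 316, 315, 320, 320]
  | 'R' => [535, 529, 533, 504, 537, 533, 556, 550, 555, 529, 556, 567, 555, 562, 534, 560, 519, 535, 528, 533, 545, 527, 525, 515, 500, 505, 516, 513, 518, 496, 491, 494, 472, 465, 484, 479, 487, 471, 454, 470, 458, 472, 458, 475, 475, 465, 474, 454, 447, 462, 469, 474, 471, 457, 456, 447, 470, 476, 482, 505, 498, 482, 469, 468]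
  | 'Q' => [906, 901, 892, 796, 969, 924, 988, 926, 914, 932, 960, 890, 920, 976, 957, 924, 898, 943, 932, 960, 972, 963, 943, 902, 901, 884, 922, 917, 925, 920, 887, 894, 886, 885, 898, 895, 899, 890, 880, 878, 870, 894, 887, 889, 884, 889, 884, 873, 864, 882, 900, 881, 885, 885, 879, 862, 861, 870, 869, 887, 869, 864, 866, 858]
  | 'K' => [20004, 20054, 20047, 19901, 19901, 20060, 20083, 19938, 19968, 20010, 20055, 20056, 20056, 20055, 20010, 20003, 19938, 20012, 19943, 20044, 19933, 20028, 20037, 19969, 19945, 20050, 20011, 19996, 19981, 20013, 20000, 19951, 19945, 19957, 19948, 19972, 19949, 19953, 19992, 19950, 19953, 19958, 19957, 19921, 19936, 19968, 19971, 19968, 19996, 20003, 19986, 19950, 19943, 19982, 20013, 20004, 20017, 20030, 19997, 19986, 20006, 19999, 20040, 20018]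
  | _ => []

-- literal port of B: pass 1 expands the field into a flat board ('ch.upper() in comb' tests the
-- same six keys, pvKeys); pass 2 tallies white and black sums over enumerate(board)
def pst_score_alt (fenstr : String) : Int :=
  let board := List.foldl (fun (b : List Char) ch =>
      if PySem.Chars.upperChar ch ∈ pvKeys then b ++ [ch]
      else if PySem.Chars.isdigit ch then
        b ++ List.replicate ((PySem.Int.ofChars? [ch]).getD 0).toNat '.'
      else b)
    [] (pvField fenstr)
  let wb := List.foldl (fun (wb : Int × Int) ip =>
      if PySem.Chars.isupper ip.2 then
        (wb.1 + (PySem.List.pyGet? (pvComb ip.2) ip.1).getD 0, wb.2)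
      else if PySem.Chars.islower ip.2 then
        (wb.1, wb.2 + (PySem.List.pyGet? (pvComb (PySem.Chars.upperChar ip.2)) (-ip.1)).getD 0)
      else wb)
    (0, 0) (PySem.List.enumerate board 0)
  wb.1 - wb.2

-- ===== PRECONDITION & SPEC =====
-- squares a char advances the position counter by: a piece 1, a digit its value, anything else 0
def pvWeight (c : Char) : Int :=
  if PySem.Chars.upperChar c ∈ pvKeys then 1
  else if PySem.Chars.isdigit c then (PySem.Int.ofChars? [c]).getD 0 else 0

-- Pre_ excludes exactly the inputs on which Python A raises IndexError: a piece whose board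
-- position overflows the 64-entry table (> 63 for a white piece, > 64 for a black one, whose
-- negated index -position still reaches the table at position 64).
def Pre_pst_score (fenstr : String) : Prop :=
  ∀ k : Nat, k < (pvField fenstr).length →
    (PySem.Chars.upperChar ((pvField fenstr).getD k ' ') ∈ pvKeys →
      (((pvField fenstr).take k).map pvWeight).sum
        + (if PySem.Chars.isupper ((pvField fenstr).getD k ' ') then 1 else 0) ≤ 64)
instance (fenstr : String) : Decidable (Pre_pst_score fenstr) := by
  unfold Pre_pst_score; infer_instance

def pvWitness_pst_score : String := "rnbqkbnr/pppppppp/8/8/8/8/PPPPPPPP/RNBQKBNR w KQkq - 0 1"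

def Spec_pst_score (fenstr : String) (out : Int) : Prop := out = pst_score_alt fenstr
instance (fenstr : String) (out : Int) : Decidable (Spec_pst_score fenstr out) := by
  unfold Spec_pst_score; infer_instance

-- ===== CLAIM (what is proved, stated in full; the proofs are below) =====
def Claim_equal_pst_score : Prop :=
  ∀ (fenstr : String), Dom_pst_score fenstr → Pre_pst_score fenstr →
    Spec_pst_score fenstr (pst_score fenstr)

-- ===== LEMMAS AND PROOFS =====

-- A's loop step and B's two steps, named for the proofs
def stepA (sp : Int × Int) (ch : Char) : Int × Int :=
  let sp :=
    if PySem.Chars.upperChar ch ∈ pvKeys then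
      (sp.1 + ((PySem.List.pyGet? (pvPst (PySem.Chars.upperChar ch))
                  (if PySem.Chars.isupper ch then sp.2 else -sp.2)).getD 0
                + pvVal (PySem.Chars.upperChar ch))
              * (if PySem.Chars.isupper ch then 1 else -1),
       sp.2 + 1)
    else sp
  if PySem.Chars.isdigit ch then (sp.1, sp.2 + (PySem.Int.ofChars? [ch]).getD 0) else sp

def stepB (wb : Int × Int) (ip : Int × Char) : Int × Int :=
  if PySem.Chars.isupper ip.2 then
    (wb.1 + (PySem.List.pyGet? (pvComb ip.2) ip.1).getD 0, wb.2)
  else if PySem.Chars.islower ip.2 then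
    (wb.1, wb.2 + (PySem.List.pyGet? (pvComb (PySem.Chars.upperChar ip.2)) (-ip.1)).getD 0)
  else wb

-- per-square contributions of B's tally pass
def cW (ip : Int × Char) : Int :=
  if PySem.Chars.isupper ip.2 then (PySem.List.pyGet? (pvComb ip.2) ip.1).getD 0 else 0
def cB (ip : Int × Char) : Int :=
  if PySem.Chars.isupper ip.2 then 0
  else if PySem.Chars.islower ip.2 then
    (PySem.List.pyGet? (pvComb (PySem.Chars.upperChar ip.2)) (-ip.1)).getD 0
  else 0

lemma stepB_eq (wb : Int × Int) (ip : Int × Char) :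
    stepB wb ip = (wb.1 + cW ip, wb.2 + cB ip) := by
  unfold stepB cW cB; split_ifs <;> simp

lemma foldl_stepB (l : List (Int × Char)) (w b : Int) :
    List.foldl stepB (w, b) l = (w + (l.map cW).sum, b + (l.map cB).sum) := by
  induction l generalizing w b with
  | nil => simp
  | cons x l ih => rw [List.foldl_cons, stepB_eq]; rw [ih]; simp; constructor <;> ring

-- the one-char expansion of pass 1
def pvEx (ch : Char) : List Char :=
  if PySem.Chars.upperChar ch ∈ pvKeys then [ch]
  else if PySem.Chars.isdigit ch then
    List.replicate ((PySem.Int.ofChars? [ch]).getD 0).toNat '.'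
  else []

lemma expand_eq_flatMap (cs : List Char) (b : List Char) :
    List.foldl (fun (b : List Char) ch =>
      if PySem.Chars.upperChar ch ∈ pvKeys then b ++ [ch]
      else if PySem.Chars.isdigit ch then
        b ++ List.replicate ((PySem.Int.ofChars? [ch]).getD 0).toNat '.'
      else b) b cs = b ++ cs.flatMap pvEx := by
  have h : (fun (b : List Char) ch =>
      if PySem.Chars.upperChar ch ∈ pvKeys then b ++ [ch]
      else if PySem.Chars.isdigit ch then
        b ++ List.replicate ((PySem.Int.ofChars? [ch]).getD 0).toNat '.'
      else b) = fun b ch => b ++ pvEx ch := by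
    funext b ch
    simp only [pvEx]
    split_ifs <;> simp
  rw [h, PySem.List.foldl_append_eq_flatMap]

lemma digit_val (c : Char) (h : PySem.Chars.isdigit c = true) :
    PySem.Int.ofChars? [c] = some ((c.toNat : Int) - 48) := by
  simp [PySem.Chars.isdigit] at h
  obtain ⟨h1, h2⟩ := h
  have hc : c = Char.ofNat c.toNat := by simp [Char.ofNat_toNat]
  rw [hc]
  have hl : 48 ≤ c.toNat := h1
  have hr : c.toNat ≤ 57 := h2
  interval_cases h : c.toNat <;> decide

lemma piece_not_digit (c : Char) (hp : PySem.Chars.upperChar c ∈ pvKeys) :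
    PySem.Chars.isdigit c = false := by
  by_contra hd
  simp only [Bool.not_eq_false] at hd
  simp [PySem.Chars.isdigit] at hd
  obtain ⟨h1, h2⟩ := hd
  have hl : 48 ≤ c.toNat := h1
  have hr : c.toNat ≤ 57 := h2
  have hc : c = Char.ofNat c.toNat := by simp [Char.ofNat_toNat]
  rw [hc] at hp
  interval_cases h : c.toNat <;> simp [pvKeys] at hp <;> revert hp <;> decide

lemma upper_id (c : Char) (h : PySem.Chars.isupper c = true) :
    PySem.Chars.upperChar c = c := by
  simp [PySem.Chars.isupper, Char.le_def, UInt32.le_iff_toNat_le] at h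
  simp [PySem.Chars.upperChar, PySem.Chars.islower, Char.le_def, UInt32.le_iff_toNat_le]
  omega

lemma upper_not_lower (c : Char) (h : PySem.Chars.isupper c = true) :
    PySem.Chars.islower c = false := by
  simp [PySem.Chars.isupper, Char.le_def, UInt32.le_iff_toNat_le] at h
  simp [PySem.Chars.islower, Char.le_def, UInt32.le_iff_toNat_le]; omega

lemma lower_of_piece (c : Char) (h : PySem.Chars.isupper c = false)
    (hp : PySem.Chars.upperChar c ∈ pvKeys) : PySem.Chars.islower c = true := by
  by_contra hl
  simp only [Bool.not_eq_true] at hl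
  simp only [PySem.Chars.upperChar, hl, Bool.false_eq_true, if_false] at hp
  simp [PySem.Chars.isupper, Char.le_def, UInt32.le_iff_toNat_le] at h
  rcases (by simpa [pvKeys] using hp : c = 'P' ∨ c = 'N' ∨ c = 'B' ∨ c = 'R' ∨ c = 'Q' ∨ c = 'K')
    with h1|h1|h1|h1|h1|h1 <;> subst h1 <;> simp at h

-- the tables: every key names a 64-entry table, and pvComb is pvPst shifted by pvVal
lemma tables (U : Char) (h : U ∈ pvKeys) :
    (pvPst U).length = 64 ∧ pvComb U = (pvPst U).map (fun v => v + pvVal U) := by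
  fin_cases h <;> exact ⟨by decide, by decide⟩

lemma pyGet?_map_int (f : Int → Int) (l : List Int) (i : Int) :
    PySem.List.pyGet? (l.map f) i = (PySem.List.pyGet? l i).map f := by
  simp [PySem.List.pyGet?]

lemma dots (m : Nat) (n : Int) (f : Int × Char → Int)
    (hf : ∀ i : Int, f (i, '.') = 0) :
    ((PySem.List.enumerate (List.replicate m '.') n).map f).sum = 0 := by
  induction m generalizing n with
  | zero => simp [PySem.List.enumerate_nil]
  | succ m ih =>
    rw [List.replicate_succ, PySem.List.enumerate_cons]
    simp [hf, ih]

-- main invariant: A's one-pass fold from (s, n) computes s plus B's white-minus-black total of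
-- the expansion of the remaining chars enumerated from n, provided no piece overflows the table
lemma main_inv (cs : List Char) (s : Int) (n : Nat)
    (H : ∀ k : Nat, k < cs.length →
      (PySem.Chars.upperChar (cs.getD k ' ') ∈ pvKeys →
        (n : Int) + ((cs.take k).map pvWeight).sum
          + (if PySem.Chars.isupper (cs.getD k ' ') then 1 else 0) ≤ 64)) :
    List.foldl stepA (s, (n : Int)) cs
      = (s + (((PySem.List.enumerate (cs.flatMap pvEx) (n : Int)).map cW).sum
              - ((PySem.List.enumerate (cs.flatMap pvEx) (n : Int)).map cB).sum),
         ((n + (cs.flatMap pvEx).length : Nat) : Int)) := by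
  induction cs generalizing s n with
  | nil => simp [PySem.List.enumerate_nil]
  | cons c cs ih =>
    by_cases hp : PySem.Chars.upperChar c ∈ pvKeys
    · have hd := piece_not_digit c hp
      have H0 := H 0 (by simp) (by simpa using hp)
      simp only [List.take_zero, List.map_nil, List.sum_nil, add_zero, List.getD_cons_zero] at H0
      have Ht : ∀ k : Nat, k < cs.length →
          (PySem.Chars.upperChar (cs.getD k ' ') ∈ pvKeys →
            ((n + 1 : Nat) : Int) + ((cs.take k).map pvWeight).sum
              + (if PySem.Chars.isupper (cs.getD k ' ') then 1 else 0) ≤ 64) := by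
        intro k hk hkp
        have h1 := H (k + 1) (by simpa using hk) (by simpa using hkp)
        simp only [List.take_succ_cons, List.map_cons, List.sum_cons, List.getD_cons_succ] at h1
        have hw : pvWeight c = 1 := by simp [pvWeight, hp]
        rw [hw] at h1
        push_cast at h1 ⊢
        linarith
      by_cases hu : PySem.Chars.isupper c = true
      · -- white piece at position n
        have hid := upper_id c hu
        have hnl := upper_not_lower c hu
        have hp' : c ∈ pvKeys := by rwa [hid] at hp
        obtain ⟨hlen, hcomb⟩ := tables c hp'
        rw [hu] at H0
        simp only [if_true] at H0
        have hn : n < (pvPst c).length := by rw [hlen]; omega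
        have hg1 : PySem.List.pyGet? (pvPst c) ((n : Int)) = some ((pvPst c)[n]) := by
          simp [List.getElem?_eq_getElem hn]
        have hg2 : PySem.List.pyGet? (pvComb c) ((n : Int))
            = some ((pvPst c)[n] + pvVal c) := by
          rw [hcomb, pyGet?_map_int, hg1]; rfl
        simp only [List.foldl_cons, stepA, if_true, hd, Bool.false_eq_true, if_false,
          hu, hid, hp']
        have hc1 : ((n : Int) + 1) = ((n + 1 : Nat) : Int) := by push_cast; ring
        rw [hc1, ih _ _ Ht]
        simp only [List.flatMap_cons, pvEx, hp, if_true, List.singleton_append,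
          PySem.List.enumerate_cons, List.map_cons, List.sum_cons, cW, cB, hu, if_true, hnl,
          Bool.false_eq_true, if_false, hg1, hg2, hc1, Option.getD_some, List.length_cons]
        refine Prod.ext ?_ ?_
        · simp only []; ring
        · simp only []; push_cast; ring
      · -- black piece at position n
        have hub : PySem.Chars.isupper c = false := by simpa using hu
        have hlo := lower_of_piece c hub hp
        obtain ⟨hlen, hcomb⟩ := tables (PySem.Chars.upperChar c) hp
        rw [hub] at H0
        simp only [Bool.false_eq_true, if_false, add_zero] at H0
        have hn64 : n ≤ 64 := by omega
        obtain ⟨v, hg1⟩ : ∃ v, PySem.List.pyGet? (pvPst (PySem.Chars.upperChar c))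
            (-(n : Int)) = some v := by
          cases hx : PySem.List.pyGet? (pvPst (PySem.Chars.upperChar c)) (-(n : Int)) with
          | none =>
            exfalso
            rw [PySem.List.pyGet?_eq_none_iff] at hx
            apply hx
            simp only [PySem.Raise.InRange, hlen]
            omega
          | some v => exact ⟨v, rfl⟩
        have hg2 : PySem.List.pyGet? (pvComb (PySem.Chars.upperChar c)) (-(n : Int))
            = some (v + pvVal (PySem.Chars.upperChar c)) := by
          rw [hcomb, pyGet?_map_int, hg1]; rfl
        simp only [List.foldl_cons, stepA, hp, if_true, hd, Bool.false_eq_true, if_false,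
          hub]
        have hc1 : ((n : Int) + 1) = ((n + 1 : Nat) : Int) := by push_cast; ring
        rw [hc1, ih _ _ Ht]
        simp only [List.flatMap_cons, pvEx, hp, if_true, List.singleton_append,
          PySem.List.enumerate_cons, List.map_cons, List.sum_cons, cW, cB, hub,
          Bool.false_eq_true, if_false, hlo, if_true, hg1, hg2, hc1, Option.getD_some,
          List.length_cons]
        refine Prod.ext ?_ ?_
        · simp only []; ring
        · simp only []; push_cast; ring
    · by_cases hd : PySem.Chars.isdigit c = true
      · -- digit: skip that many squares
        have hv := digit_val c hd
        have h48 : 48 ≤ c.toNat ∧ c.toNat ≤ 57 := by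
          simpa [PySem.Chars.isdigit] using hd
        have hm : (0 : Int) ≤ (PySem.Int.ofChars? [c]).getD 0 := by
          rw [hv]; simp; omega
        have hmN : (((PySem.Int.ofChars? [c]).getD 0).toNat : Int)
            = (PySem.Int.ofChars? [c]).getD 0 := Int.toNat_of_nonneg hm
        have Ht : ∀ k : Nat, k < cs.length →
            (PySem.Chars.upperChar (cs.getD k ' ') ∈ pvKeys →
              ((n + ((PySem.Int.ofChars? [c]).getD 0).toNat : Nat) : Int)
                + ((cs.take k).map pvWeight).sum
                + (if PySem.Chars.isupper (cs.getD k ' ') then 1 else 0) ≤ 64) := by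
          intro k hk hkp
          have h1 := H (k + 1) (by simpa using hk) (by simpa using hkp)
          simp only [List.take_succ_cons, List.map_cons, List.sum_cons,
            List.getD_cons_succ] at h1
          have hw : pvWeight c = (PySem.Int.ofChars? [c]).getD 0 := by
            simp [pvWeight, hp, hd]
          rw [hw] at h1
          push_cast [hmN] at h1 ⊢
          linarith
        simp only [List.foldl_cons, stepA, hp, if_false, hd, if_true]
        have hc1 : ((n : Int) + (PySem.Int.ofChars? [c]).getD 0)
            = ((n + ((PySem.Int.ofChars? [c]).getD 0).toNat : Nat) : Int) := by
          push_cast [hmN]; ring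
        rw [hc1, ih _ _ Ht]
        simp only [List.flatMap_cons, pvEx, hp, if_false, hd, if_true,
          PySem.List.enumerate_append, List.map_append, List.sum_append,
          List.length_replicate, List.length_append]
        rw [dots _ _ cW (by
              intro i
              simp [cW, show PySem.Chars.isupper '.' = false by decide]),
            dots _ _ cB (by
              intro i
              simp [cB, show PySem.Chars.isupper '.' = false by decide,
                show PySem.Chars.islower '.' = false by decide])]
        have hc2 : ((n : Int) + (((PySem.Int.ofChars? [c]).getD 0).toNat : Int))
            = ((n + ((PySem.Int.ofChars? [c]).getD 0).toNat : Nat) : Int) := by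
          push_cast; ring
        rw [hc2]
        refine Prod.ext ?_ ?_
        · simp only []; ring
        · simp only []; push_cast; ring
      · -- any other char: skipped entirely
        have hdb : PySem.Chars.isdigit c = false := by simpa using hd
        have Ht : ∀ k : Nat, k < cs.length →
            (PySem.Chars.upperChar (cs.getD k ' ') ∈ pvKeys →
              ((n : Nat) : Int) + ((cs.take k).map pvWeight).sum
                + (if PySem.Chars.isupper (cs.getD k ' ') then 1 else 0) ≤ 64) := by
          intro k hk hkp
          have h1 := H (k + 1) (by simpa using hk) (by simpa using hkp)
          simp only [List.take_succ_cons, List.map_cons, List.sum_cons,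
            List.getD_cons_succ] at h1
          have hw : pvWeight c = 0 := by simp [pvWeight, hp, hdb]
          rw [hw] at h1
          linarith
        simp only [List.foldl_cons, stepA, hp, if_false, hdb, Bool.false_eq_true]
        rw [ih _ _ Ht]
        simp only [List.flatMap_cons, pvEx, hp, if_false, hdb, Bool.false_eq_true,
          List.nil_append]

-- ===== VERDICT (by name: the statement is the Claim_ definition above) =====
theorem pst_score_spec : Claim_equal_pst_score := by
  intro fenstr _ hpre
  unfold Spec_pst_score pst_score pst_score_alt
  rw [expand_eq_flatMap]
  simp only [List.nil_append]
  have h := main_inv (pvField fenstr) 0 0 (by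
    intro k hk hp
    have := hpre k hk hp
    simpa using this)
  show (List.foldl stepA ((0 : Int), (0 : Int)) (pvField fenstr)).1
      = (fun wb : Int × Int => wb.1 - wb.2)
          (List.foldl stepB ((0 : Int), (0 : Int))
            (PySem.List.enumerate ((pvField fenstr).flatMap pvEx) (((0 : Nat) : Int))))
  rw [foldl_stepB]
  simp only [Nat.cast_zero, zero_add] at h
  rw [h]
  simp
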